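-- pv_equiv track=rewrite | github.com/KaplanHalil/AvalCorrTests | Mk_Rk_aval.py | convert_2d_list
-- ===== SOURCE A (Python) =====
-- def convert_2d_list(input_list):
--     def convert_value(value):
--         if 0 <= value < 300:
--             return 0
--         elif 300 <= value < 350:
--             return 50
--         elif 350 <= value < 400:
--             return 100
--         elif 400 <= value < 500:
--             return 150
--         elif 500 <= value < 600:
--             return 255
--         elif 600 <= value < 700:
--             return 150
--         elif 700 <= value < 800:
--             return 100
--         elif 800 <= value < 900:
--             return 50
--         elif 900 <= value <= 1000:
--             return 0
--         else:
--             raise ValueError(f"Value {value} is out of range 0-1000.")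
--
--     return [convert_value(value) for row in input_list for value in row]
-- ===== SOURCE B (Python) =====
-- import bisect
--
-- _THRESHOLDS = [300, 350, 400, 500, 600, 700, 800, 900]
-- _OUTPUTS = [0, 50, 100, 150, 255, 150, 100, 50, 0]
--
-- def convert_2d_list(input_list):
--     out = []
--     for row in input_list:
--         for value in row:
--             if not (0 <= value <= 1000):
--                 raise ValueError(f"Value {value} is out of range 0-1000.")
--             out.append(_OUTPUTS[bisect.bisect_right(_THRESHOLDS, value)])
--     return out
-- ===== Notes on version B (the rewrite author's own statement) =====
-- stated objective: idiomatic
-- what changed: Replaces the nine-branch if/elif chain per element by a single range guard plus a binary-search bucket lookup (bisect_right over a sorted threshold table with a parallel output table).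
import Mathlib
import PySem

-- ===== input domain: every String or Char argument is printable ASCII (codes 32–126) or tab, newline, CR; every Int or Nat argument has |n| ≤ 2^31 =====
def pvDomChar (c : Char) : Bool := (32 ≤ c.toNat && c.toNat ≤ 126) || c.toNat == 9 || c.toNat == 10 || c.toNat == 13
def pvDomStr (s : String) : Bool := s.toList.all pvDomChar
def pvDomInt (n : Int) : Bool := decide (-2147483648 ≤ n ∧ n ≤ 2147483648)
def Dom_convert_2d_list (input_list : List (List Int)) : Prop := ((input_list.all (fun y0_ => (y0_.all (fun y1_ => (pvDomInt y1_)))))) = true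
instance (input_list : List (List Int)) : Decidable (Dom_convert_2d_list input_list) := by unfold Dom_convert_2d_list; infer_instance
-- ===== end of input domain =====

-- B replaces A's nine-branch if/elif chain by a range guard plus a sorted-threshold
-- table lookup (bisect_right); same values, same flattening order (idiomatic rewrite).


-- ===== PORT A =====
-- convert_value: the if/elif chain; the final 'else' raises ValueError in Python —
-- those inputs are excluded by Pre_; the port returns 0 there (unreachable under Pre_).
def pvConvertValue (value : Int) : Int :=
  if 0 ≤ value ∧ value < 300 then 0
  else if 300 ≤ value ∧ value < 350 then 50
  else if 350 ≤ value ∧ value < 400 then 100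
  else if 400 ≤ value ∧ value < 500 then 150
  else if 500 ≤ value ∧ value < 600 then 255
  else if 600 ≤ value ∧ value < 700 then 150
  else if 700 ≤ value ∧ value < 800 then 100
  else if 800 ≤ value ∧ value < 900 then 50
  else if 900 ≤ value ∧ value ≤ 1000 then 0
  else 0  -- raise ValueError (outside Pre_)

def convert_2d_list (input_list : List (List Int)) : List Int :=
  input_list.flatMap (fun row => row.map pvConvertValue)

-- ===== PORT B =====
def pvThresholds : List Int := [300, 350, 400, 500, 600, 700, 800, 900]
def pvOutputs : List Int := [0, 50, 100, 150, 255, 150, 100, 50, 0]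

-- bisect.bisect_right on a sorted list = number of elements ≤ v (stdlib call, ported by contract)
def pvBisectRight (xs : List Int) (v : Int) : Nat := xs.countP (fun t => decide (t ≤ v))

def convert_2d_list_alt (input_list : List (List Int)) : List Int :=
  input_list.foldl (fun out row =>
    row.foldl (fun out value =>
      if 0 ≤ value ∧ value ≤ 1000 then
        out ++ [pvOutputs.getD (pvBisectRight pvThresholds value) 0]
      else out ++ [0]  -- raise ValueError (outside Pre_)
    ) out) []

-- ===== PRECONDITION & SPEC =====
-- Pre_ excludes exactly the inputs on which A raises ValueError: some element outside 0..1000.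
def Pre_convert_2d_list (input_list : List (List Int)) : Prop :=
  (input_list.all (fun row => row.all (fun v => decide (0 ≤ v ∧ v ≤ 1000)))) = true
instance (input_list : List (List Int)) : Decidable (Pre_convert_2d_list input_list) := by
  unfold Pre_convert_2d_list; infer_instance
def pvWitness_convert_2d_list : List (List Int) := [[0, 299, 300], [350, 1000], []]

def Spec_convert_2d_list (input_list : List (List Int)) (out : List Int) : Prop := out = convert_2d_list_alt input_list
instance (input_list : List (List Int)) (out : List Int) : Decidable (Spec_convert_2d_list input_list out) := by unfold Spec_convert_2d_list; infer_instance

-- ===== CLAIM (what is proved, stated in full; the proofs are below) =====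
def Claim_equal_convert_2d_list : Prop := ∀ (input_list : List (List Int)), Dom_convert_2d_list input_list → Pre_convert_2d_list input_list → Spec_convert_2d_list input_list (convert_2d_list input_list)

-- ===== LEMMAS AND PROOFS =====

-- pointwise: for in-range v the chain and the table lookup agree
set_option maxHeartbeats 800000 in
theorem pv_point (v : Int) (h0 : 0 ≤ v) (h1 : v ≤ 1000) :
    pvConvertValue v = pvOutputs.getD (pvBisectRight pvThresholds v) 0 := by
  unfold pvConvertValue
  split_ifs with g1 g2 g3 g4 g5 g6 g7 g8 g9
  · have hc : pvBisectRight pvThresholds v = 0 := by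
      unfold pvBisectRight pvThresholds
      simp only [List.countP_cons, List.countP_nil, show decide ((300:Int) ≤ v) = false from by simp; omega, show decide ((350:Int) ≤ v) = false from by simp; omega, show decide ((400:Int) ≤ v) = false from by simp; omega, show decide ((500:Int) ≤ v) = false from by simp; omega, show decide ((600:Int) ≤ v) = false from by simp; omega, show decide ((700:Int) ≤ v) = false from by simp; omega, show decide ((800:Int) ≤ v) = false from by simp; omega, show decide ((900:Int) ≤ v) = false from by simp; omega]
      decide
    rw [hc]; rfl
  · have hc : pvBisectRight pvThresholds v = 1 := by
      unfold pvBisectRight pvThresholds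
      simp only [List.countP_cons, List.countP_nil, show decide ((300:Int) ≤ v) = true from by simp; omega, show decide ((350:Int) ≤ v) = false from by simp; omega, show decide ((400:Int) ≤ v) = false from by simp; omega, show decide ((500:Int) ≤ v) = false from by simp; omega, show decide ((600:Int) ≤ v) = false from by simp; omega, show decide ((700:Int) ≤ v) = false from by simp; omega, show decide ((800:Int) ≤ v) = false from by simp; omega, show decide ((900:Int) ≤ v) = false from by simp; omega]
      decide
    rw [hc]; rfl
  · have hc : pvBisectRight pvThresholds v = 2 := by
      unfold pvBisectRight pvThresholds
      simp only [List.countP_cons, List.countP_nil, show decide ((300:Int) ≤ v) = true from by simp; omega, show decide ((350:Int) ≤ v) = true from by simp; omega, show decide ((400:Int) ≤ v) = false from by simp; omega, show decide ((500:Int) ≤ v) = false from by simp; omega, show decide ((600:Int) ≤ v) = false from by simp; omega, show decide ((700:Int) ≤ v) = false from by simp; omega, show decide ((800:Int) ≤ v) = false from by simp; omega, show decide ((900:Int) ≤ v) = false from by simp; omega]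
      decide
    rw [hc]; rfl
  · have hc : pvBisectRight pvThresholds v = 3 := by
      unfold pvBisectRight pvThresholds
      simp only [List.countP_cons, List.countP_nil, show decide ((300:Int) ≤ v) = true from by simp; omega, show decide ((350:Int) ≤ v) = true from by simp; omega, show decide ((400:Int) ≤ v) = true from by simp; omega, show decide ((500:Int) ≤ v) = false from by simp; omega, show decide ((600:Int) ≤ v) = false from by simp; omega, show decide ((700:Int) ≤ v) = false from by simp; omega, show decide ((800:Int) ≤ v) = false from by simp; omega, show decide ((900:Int) ≤ v) = false from by simp; omega]
      decide
    rw [hc]; rfl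
  · have hc : pvBisectRight pvThresholds v = 4 := by
      unfold pvBisectRight pvThresholds
      simp only [List.countP_cons, List.countP_nil, show decide ((300:Int) ≤ v) = true from by simp; omega, show decide ((350:Int) ≤ v) = true from by simp; omega, show decide ((400:Int) ≤ v) = true from by simp; omega, show decide ((500:Int) ≤ v) = true from by simp; omega, show decide ((600:Int) ≤ v) = false from by simp; omega, show decide ((700:Int) ≤ v) = false from by simp; omega, show decide ((800:Int) ≤ v) = false from by simp; omega, show decide ((900:Int) ≤ v) = false from by simp; omega]
      decide
    rw [hc]; rfl
  · have hc : pvBisectRight pvThresholds v = 5 := by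
      unfold pvBisectRight pvThresholds
      simp only [List.countP_cons, List.countP_nil, show decide ((300:Int) ≤ v) = true from by simp; omega, show decide ((350:Int) ≤ v) = true from by simp; omega, show decide ((400:Int) ≤ v) = true from by simp; omega, show decide ((500:Int) ≤ v) = true from by simp; omega, show decide ((600:Int) ≤ v) = true from by simp; omega, show decide ((700:Int) ≤ v) = false from by simp; omega, show decide ((800:Int) ≤ v) = false from by simp; omega, show decide ((900:Int) ≤ v) = false from by simp; omega]
      decide
    rw [hc]; rfl
  · have hc : pvBisectRight pvThresholds v = 6 := by
      unfold pvBisectRight pvThresholds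
      simp only [List.countP_cons, List.countP_nil, show decide ((300:Int) ≤ v) = true from by simp; omega, show decide ((350:Int) ≤ v) = true from by simp; omega, show decide ((400:Int) ≤ v) = true from by simp; omega, show decide ((500:Int) ≤ v) = true from by simp; omega, show decide ((600:Int) ≤ v) = true from by simp; omega, show decide ((700:Int) ≤ v) = true from by simp; omega, show decide ((800:Int) ≤ v) = false from by simp; omega, show decide ((900:Int) ≤ v) = false from by simp; omega]
      decide
    rw [hc]; rfl
  · have hc : pvBisectRight pvThresholds v = 7 := by
      unfold pvBisectRight pvThresholds
      simp only [List.countP_cons, List.countP_nil, show decide ((300:Int) ≤ v) = true from by simp; omega, show decide ((350:Int) ≤ v) = true from by simp; omega, show decide ((400:Int) ≤ v) = true from by simp; omega, show decide ((500:Int) ≤ v) = true from by simp; omega, show decide ((600:Int) ≤ v) = true from by simp; omega, show decide ((700:Int) ≤ v) = true from by simp; omega, show decide ((800:Int) ≤ v) = true from by simp; omega, show decide ((900:Int) ≤ v) = false from by simp; omega]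
      decide
    rw [hc]; rfl
  · have hc : pvBisectRight pvThresholds v = 8 := by
      unfold pvBisectRight pvThresholds
      simp only [List.countP_cons, List.countP_nil, show decide ((300:Int) ≤ v) = true from by simp; omega, show decide ((350:Int) ≤ v) = true from by simp; omega, show decide ((400:Int) ≤ v) = true from by simp; omega, show decide ((500:Int) ≤ v) = true from by simp; omega, show decide ((600:Int) ≤ v) = true from by simp; omega, show decide ((700:Int) ≤ v) = true from by simp; omega, show decide ((800:Int) ≤ v) = true from by simp; omega, show decide ((900:Int) ≤ v) = true from by simp; omega]
      decide
    rw [hc]; rfl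
  · omega

-- B's inner loop step as a map with accumulator
theorem pv_inner (row : List Int) (acc : List Int)
    (h : ∀ v ∈ row, 0 ≤ v ∧ v ≤ 1000) :
    row.foldl (fun out value =>
      if 0 ≤ value ∧ value ≤ 1000 then
        out ++ [pvOutputs.getD (pvBisectRight pvThresholds value) 0]
      else out ++ [0]) acc = acc ++ row.map pvConvertValue := by
  induction row generalizing acc with
  | nil => simp
  | cons v t ih =>
    have hv := h v (List.mem_cons_self ..)
    simp only [List.foldl_cons, if_pos hv, List.map_cons]
    rw [ih _ (fun x hx => h x (List.mem_cons_of_mem _ hx)),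
        pv_point v hv.1 hv.2]
    simp

theorem pv_outer (rows : List (List Int)) (acc : List Int)
    (h : ∀ row ∈ rows, ∀ v ∈ row, 0 ≤ v ∧ v ≤ 1000) :
    rows.foldl (fun out row =>
      row.foldl (fun out value =>
        if 0 ≤ value ∧ value ≤ 1000 then
          out ++ [pvOutputs.getD (pvBisectRight pvThresholds value) 0]
        else out ++ [0]) out) acc
    = acc ++ rows.flatMap (fun row => row.map pvConvertValue) := by
  induction rows generalizing acc with
  | nil => simp
  | cons r t ih =>
    simp only [List.foldl_cons, List.flatMap_cons]
    rw [pv_inner r acc (h r (List.mem_cons_self ..)),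
        ih _ (fun x hx => h x (List.mem_cons_of_mem _ hx))]
    simp

-- ===== VERDICT (by name: the statement is the Claim_ definition above) =====
theorem convert_2d_list_spec : Claim_equal_convert_2d_list := by
  intro input_list _ hpre
  unfold Spec_convert_2d_list convert_2d_list convert_2d_list_alt
  rw [pv_outer]
  · simp
  · intro row hr v hv
    simp only [Pre_convert_2d_list, List.all_eq_true, decide_eq_true_eq] at hpre
    exact hpre row hr v hv
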